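-- pv_equiv track=rewrite | github.com/MrBrantCode/unitest_baseline | mut_generate/mist_train_cf/cf_70071/solution.py | entance
-- ===== SOURCE A (Python) =====
-- def entance(x, y, z, n):
--     # Create a list of Fibonacci numbers up to n terms
--     fibonacci = []
--     a, b = 0, 1
--     for i in range(n):
--         fibonacci.append(a)
--         a, b = b, a + b
--
--     # If the third parameter 'z' is in the Fibonacci sequence, set it to '0'.
--     # If it's not in the sequence, keep it as it is.
--     z = 0 if z in fibonacci else z
--
--     return x, y, z, n
-- ===== SOURCE B (Python) =====
-- def entance(x, y, z, n):
--     # Walk the Fibonacci sequence directly, stopping early once the terms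
--     # pass z (or n terms are exhausted); no list is built.
--     a, b, i = 0, 1, 0
--     while i < n and a < z:
--         a, b = b, a + b
--         i += 1
--     if i < n and a == z:
--         z = 0
--     return x, y, z, n
-- ===== Notes on version B (the rewrite author's own statement) =====
-- stated objective: faster
-- what changed: B walks the Fibonacci sequence with an early exit once terms exceed z, never materialising the n-term list A builds and scans.
import Mathlib
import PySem

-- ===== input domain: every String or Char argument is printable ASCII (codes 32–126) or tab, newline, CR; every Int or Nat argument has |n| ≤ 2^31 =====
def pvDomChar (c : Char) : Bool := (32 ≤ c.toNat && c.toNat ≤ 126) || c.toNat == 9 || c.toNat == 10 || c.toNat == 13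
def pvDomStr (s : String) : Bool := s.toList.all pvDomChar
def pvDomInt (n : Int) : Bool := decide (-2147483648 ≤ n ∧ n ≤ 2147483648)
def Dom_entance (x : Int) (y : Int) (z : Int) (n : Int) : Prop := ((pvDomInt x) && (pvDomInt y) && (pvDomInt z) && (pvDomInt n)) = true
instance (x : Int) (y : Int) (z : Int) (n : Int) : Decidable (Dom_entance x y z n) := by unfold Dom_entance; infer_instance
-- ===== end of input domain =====

-- B replaces A's build-a-list-then-scan with a direct early-exit walk of the Fibonacci sequence (no list); faster when n is large.

-- ===== PORT A =====
-- for i in range(n): fibonacci.append(a); a, b = b, a + b   — fold over pyRange with state (fibonacci, a, b)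
def entance (x : Int) (y : Int) (z : Int) (n : Int) : List Int :=
  let s := (PySem.List.pyRange 0 n 1).foldl
    (fun (st : List Int × Int × Int) _ => (st.1 ++ [st.2.1], st.2.2, st.2.1 + st.2.2)) ([], 0, 1)
  let z := if z ∈ s.1 then 0 else z
  [x, y, z, n]

-- ===== PORT B =====
-- while i < n and a < z: a, b = b, a + b; i += 1   — structural recursion on the fuel (n - i).toNat; returns (a, i) at exit
def entanceLoop (z n a b i : Int) : Int × Int :=
  if h : i < n ∧ a < z then entanceLoop z n b (a + b) (i + 1) else (a, i)
termination_by (n - i).toNat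
decreasing_by omega

def entance_alt (x : Int) (y : Int) (z : Int) (n : Int) : List Int :=
  let p := entanceLoop z n 0 1 0
  let z := if p.2 < n ∧ p.1 = z then 0 else z
  [x, y, z, n]

-- ===== PRECONDITION & SPEC =====
def Spec_entance (x : Int) (y : Int) (z : Int) (n : Int) (out : List Int) : Prop := out = entance_alt x y z n
instance (x : Int) (y : Int) (z : Int) (n : Int) (out : List Int) : Decidable (Spec_entance x y z n out) := by unfold Spec_entance; infer_instance

-- ===== CLAIM (what is proved, stated in full; the proofs are below) =====
def Claim_equal_entance : Prop := ∀ (x : Int) (y : Int) (z : Int) (n : Int), Dom_entance x y z n → Spec_entance x y z n (entance x y z n)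

-- ===== LEMMAS AND PROOFS =====

-- the first m Fibonacci numbers starting from the pair (a, b)
def fibListAux : Nat → Int → Int → List Int
  | 0, _, _ => []
  | m + 1, a, b => a :: fibListAux m b (a + b)

theorem foldA_eq (l : List Int) (acc : List Int) (a b : Int) :
    (l.foldl (fun (st : List Int × Int × Int) _ => (st.1 ++ [st.2.1], st.2.2, st.2.1 + st.2.2)) (acc, a, b)).1
      = acc ++ fibListAux l.length a b := by
  induction l generalizing acc a b with
  | nil => simp [fibListAux]
  | cons hd tl ih =>
      simp only [List.foldl_cons, List.length_cons, fibListAux]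
      rw [ih]
      simp

theorem mem_fibListAux_lower {w : Int} : ∀ (m : Nat) (a b : Int), 0 ≤ a → a ≤ b → w ∈ fibListAux m a b → a ≤ w := by
  intro m
  induction m with
  | zero => intro a b _ _ h; simp [fibListAux] at h
  | succ m ih =>
      intro a b ha hab h
      simp only [fibListAux, List.mem_cons] at h
      rcases h with h | h
      · omega
      · have := ih b (a + b) (by omega) (by omega) h
        omega

theorem entanceLoop_mem : ∀ (m : Nat) (z n a b i : Int), (n - i).toNat = m → 0 ≤ a → a ≤ b →
    (((entanceLoop z n a b i).2 < n ∧ (entanceLoop z n a b i).1 = z) ↔ z ∈ fibListAux m a b) := by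
  intro m
  induction m with
  | zero =>
      intro z n a b i hm ha hab
      have hni : ¬ i < n := by omega
      rw [entanceLoop]
      simp [hni, fibListAux]
  | succ m ih =>
      intro z n a b i hm ha hab
      have hni : i < n := by omega
      rw [entanceLoop]
      by_cases haz : a < z
      · simp only [hni, haz, and_self, dite_true]
        rw [ih z n b (a + b) (i + 1) (by omega) (by omega) (by omega)]
        simp only [fibListAux, List.mem_cons]
        have hza : z ≠ a := by omega
        tauto
      · have hcond : ¬ (i < n ∧ a < z) := by tauto
        simp only [hcond, dite_false]
        simp only [fibListAux, List.mem_cons]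
        constructor
        · rintro ⟨_, rfl⟩; exact Or.inl rfl
        · rintro (rfl | h)
          · exact ⟨hni, rfl⟩
          · have hb := mem_fibListAux_lower m b (a + b) (by omega) (by omega) h
            exact ⟨hni, by omega⟩

-- ===== VERDICT (by name: the statement is the Claim_ definition above) =====
theorem entance_spec : Claim_equal_entance := by
  intro x y z n _
  unfold Spec_entance entance entance_alt
  have hfold := foldA_eq (PySem.List.pyRange 0 n 1) [] 0 1
  have hlen : (PySem.List.pyRange 0 n 1).length = n.toNat := by
    rw [PySem.List.length_pyRange_one]; omega
  rw [hlen, List.nil_append] at hfold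
  have hmem := entanceLoop_mem n.toNat z n 0 1 0 (by omega) le_rfl (by norm_num)
  simp only [hfold]
  by_cases hz : z ∈ fibListAux n.toNat 0 1
  · have h2 := hmem.mpr hz
    simp [hz, h2.1, h2.2]
  · have hc : ¬ ((entanceLoop z n 0 1 0).2 < n ∧ (entanceLoop z n 0 1 0).1 = z) :=
      fun h => hz (hmem.mp h)
    simp [hz, hc]
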